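-- pv_equiv track=rewrite | github.com/Josh-Eno/AdventOfCode2024 | advent_of_code_2024/jay/day10/solution.py | find_trailhead_ratings
-- ===== SOURCE A (Python) =====
-- def neighbors(r, c, rows, cols):
--     # Return valid up/down/left/right neighbors
--     for nr, nc in [(r-1,c),(r+1,c),(r,c-1),(r,c+1)]:
--         if 0 <= nr < rows and 0 <= nc < cols:
--             yield nr, nc
--
-- def find_trailhead_ratings(grid):
--     rows = len(grid)
--     cols = len(grid[0]) if rows > 0 else 0
--
--     # DP array for memoization: number of distinct paths from (r,c) to a '9'
--     dp = [[None] * cols for _ in range(rows)]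
--
--     def get_paths(r, c):
--         if dp[r][c] is not None:
--             return dp[r][c]
--
--         current_height = grid[r][c]
--         if current_height == 9:
--             dp[r][c] = 1
--             return 1
--
--         count = 0
--         next_height = current_height + 1
--         for nr, nc in neighbors(r, c, rows, cols):
--             if grid[nr][nc] == next_height:
--                 count += get_paths(nr, nc)
--
--         dp[r][c] = count
--         return count
--
--     # Compute dp for all cells
--     for r in range(rows):
--         for c in range(cols):
--             if dp[r][c] is None:
--                 get_paths(r, c)
--
--     # Identify all trailheads (cells of height 0) and sum their dp values
--     total_rating = 0
--     for r in range(rows):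
--         for c in range(cols):
--             if grid[r][c] == 0:
--                 total_rating += dp[r][c]
--
--     return total_rating
-- ===== SOURCE B (Python) =====
-- def find_trailhead_ratings(grid):
--     rows = len(grid)
--     cols = len(grid[0]) if rows > 0 else 0
--     cells = [(r, c) for r in range(rows) for c in range(cols)]
--     # bottom-up sweep: process cells in descending height order, so every
--     # height+1 neighbor's count is already available when a cell is reached
--     dp = {}
--     for r, c in sorted(cells, key=lambda rc: -grid[rc[0]][rc[1]]):
--         h = grid[r][c]
--         if h == 9:
--             dp[(r, c)] = 1
--         else:
--             dp[(r, c)] = sum(dp[(nr, nc)]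
--                              for nr, nc in ((r - 1, c), (r + 1, c), (r, c - 1), (r, c + 1))
--                              if 0 <= nr < rows and 0 <= nc < cols and grid[nr][nc] == h + 1)
--     return sum(dp[(r, c)] for r, c in cells if grid[r][c] == 0)
-- ===== Notes on version B (the rewrite author's own statement) =====
-- stated objective: alternative
-- what changed: Replaces A's recursive memoization (get_paths with a dp table filled on demand) by a non-recursive bottom-up sweep: cells are sorted by descending height and each cell's path count is computed from its already-finished height+1 neighbors, then trailhead counts are summed.
import Mathlib
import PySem

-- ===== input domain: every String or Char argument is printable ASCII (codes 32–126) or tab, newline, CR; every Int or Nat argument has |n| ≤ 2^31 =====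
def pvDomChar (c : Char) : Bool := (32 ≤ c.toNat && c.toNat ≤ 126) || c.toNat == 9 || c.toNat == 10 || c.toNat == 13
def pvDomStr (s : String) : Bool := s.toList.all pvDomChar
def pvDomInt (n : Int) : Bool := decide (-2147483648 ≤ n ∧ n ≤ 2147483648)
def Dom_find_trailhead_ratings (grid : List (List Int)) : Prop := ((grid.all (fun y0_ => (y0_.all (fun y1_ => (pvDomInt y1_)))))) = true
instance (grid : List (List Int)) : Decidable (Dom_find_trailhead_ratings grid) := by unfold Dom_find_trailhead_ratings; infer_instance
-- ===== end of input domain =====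

-- B replaces A's recursive memoization by a non-recursive bottom-up sweep over the cells
-- sorted by descending height (objective: alternative, same asymptotic cost).

-- ===== PORT A =====
-- grid[r][c]; exact for the in-bounds indices, the only ones either port reads inside Pre_
def pvGet (grid : List (List Int)) (r c : Int) : Int :=
  (PySem.List.pyGet? ((PySem.List.pyGet? grid r).getD []) c).getD 0

-- the bounds test `0 <= nr < rows and 0 <= nc < cols`
def pvInb (rows cols : Int) (p : Int × Int) : Bool :=
  decide (0 ≤ p.1 ∧ p.1 < rows ∧ 0 ≤ p.2 ∧ p.2 < cols)

-- Python's `neighbors(r, c, rows, cols)` generator, as the list it yields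
def pvNeighbors (r c rows cols : Int) : List (Int × Int) :=
  [(r - 1, c), (r + 1, c), (r, c - 1), (r, c + 1)].filter (pvInb rows cols)

-- A's `get_paths`, with the memo table `dp` (list-of-lists of None, represented as the
-- dict of its non-None entries keyed by (r, c)) threaded through; the Nat fuel only makes
-- the recursion structural: Python's recursion depth is bounded by the number of cells,
-- and the fuel passed by the port always exceeds that, so the 0-fuel branch is never hit.
mutual
def pvGetPaths (grid : List (List Int)) (rows cols : Int) (fuel : Nat)
    (dp : PySem.Dict (Int × Int) Int) (r c : Int) : PySem.Dict (Int × Int) Int × Int :=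
  match fuel with
  | 0 => (dp, 0)
  | Nat.succ fuel' =>
    match PySem.Dict.get? dp (r, c) with
    | some v => (dp, v)
    | none =>
      let h := pvGet grid r c
      if h == 9 then (PySem.Dict.insert dp (r, c) 1, 1)
      else
        let res := pvGoNbrs grid rows cols fuel' dp (pvNeighbors r c rows cols) (h + 1) 0
        (PySem.Dict.insert res.1 (r, c) res.2, res.2)
  termination_by (fuel, 0)

-- the `for nr, nc in neighbors(...): if grid[nr][nc] == next_height: count += get_paths(nr, nc)` loop
def pvGoNbrs (grid : List (List Int)) (rows cols : Int) (fuel : Nat)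
    (dp : PySem.Dict (Int × Int) Int) (ps : List (Int × Int)) (nh acc : Int) :
    PySem.Dict (Int × Int) Int × Int :=
  match ps with
  | [] => (dp, acc)
  | p :: ps' =>
    if pvGet grid p.1 p.2 == nh then
      let res := pvGetPaths grid rows cols fuel dp p.1 p.2
      pvGoNbrs grid rows cols fuel res.1 ps' nh (acc + res.2)
    else
      pvGoNbrs grid rows cols fuel dp ps' nh acc
  termination_by (fuel, ps.length + 1)
end

def find_trailhead_ratings (grid : List (List Int)) : Int :=
  let rows : Int := grid.length
  let cols : Int := if 0 < rows then ((grid.headD []).length : Int) else 0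
  let fuel : Nat := (rows * cols).toNat + 1
  let dp :=
    (PySem.List.pyRange 0 rows 1).foldl (fun dp r =>
      (PySem.List.pyRange 0 cols 1).foldl (fun dp c =>
        match PySem.Dict.get? dp (r, c) with
        | some _ => dp
        | none => (pvGetPaths grid rows cols fuel dp r c).1) dp)
      (PySem.Dict.empty : PySem.Dict (Int × Int) Int)
  (PySem.List.pyRange 0 rows 1).foldl (fun tot r =>
    (PySem.List.pyRange 0 cols 1).foldl (fun tot c =>
      if pvGet grid r c == 0 then tot + PySem.Dict.getD dp (r, c) 0 else tot) tot) 0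

-- ===== PORT B =====
-- Source B: all cells sorted by descending height, dp filled bottom-up (a cell's height+1
-- neighbors are strictly higher, hence already present when the cell is processed, so
-- Source B's dp[(nr, nc)] lookup never misses and getD's default is dead).
def find_trailhead_ratings_alt (grid : List (List Int)) : Int :=
  let rows : Int := grid.length
  let cols : Int := if 0 < rows then ((grid.headD []).length : Int) else 0
  let cells := (PySem.List.pyRange 0 rows 1).flatMap (fun r =>
    (PySem.List.pyRange 0 cols 1).map (fun c => (r, c)))
  let order := PySem.List.sorted cells (fun rc => -(pvGet grid rc.1 rc.2)) false
  let dp := order.foldl (fun dp rc =>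
      let h := pvGet grid rc.1 rc.2
      if h == 9 then PySem.Dict.insert dp rc 1
      else
        PySem.Dict.insert dp rc
          (([(rc.1 - 1, rc.2), (rc.1 + 1, rc.2), (rc.1, rc.2 - 1), (rc.1, rc.2 + 1)].filter
              (fun p => pvInb rows cols p && (pvGet grid p.1 p.2 == h + 1))).foldl
            (fun s p => s + PySem.Dict.getD dp p 0) 0))
    (PySem.Dict.empty : PySem.Dict (Int × Int) Int)
  (cells.filter (fun rc => pvGet grid rc.1 rc.2 == 0)).foldl
    (fun s rc => s + PySem.Dict.getD dp rc 0) 0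

-- ===== PRECONDITION & SPEC =====
-- Pre_ excludes exactly the ragged grids in which some row is shorter than row 0:
-- there A raises IndexError (it indexes every row up to len(grid[0])).
def Pre_find_trailhead_ratings (grid : List (List Int)) : Prop :=
  ∀ row ∈ grid, (grid.headD []).length ≤ row.length
instance (grid : List (List Int)) : Decidable (Pre_find_trailhead_ratings grid) := by
  unfold Pre_find_trailhead_ratings; infer_instance

def pvWitness_find_trailhead_ratings : List (List Int) :=
  [[0, 1, 2], [1, 2, 3], [8, 9, 4]]

def Spec_find_trailhead_ratings (grid : List (List Int)) (out : Int) : Prop := out = find_trailhead_ratings_alt grid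
instance (grid : List (List Int)) (out : Int) : Decidable (Spec_find_trailhead_ratings grid out) := by unfold Spec_find_trailhead_ratings; infer_instance

-- ===== CLAIM (what is proved, stated in full; the proofs are below) =====
def Claim_equal_find_trailhead_ratings : Prop := ∀ (grid : List (List Int)), Dom_find_trailhead_ratings grid → Pre_find_trailhead_ratings grid → Spec_find_trailhead_ratings grid (find_trailhead_ratings grid)

-- ===== LEMMAS AND PROOFS =====

-- the cell list [(r, c) for r in range(rows) for c in range(cols)]
def pvCells (rows cols : Int) : List (Int × Int) :=
  (PySem.List.pyRange 0 rows 1).flatMap (fun r =>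
    (PySem.List.pyRange 0 cols 1).map (fun c => (r, c)))

lemma pvMem_cells (rows cols : Int) (p : Int × Int) :
    p ∈ pvCells rows cols ↔ pvInb rows cols p = true := by
  obtain ⟨a, b⟩ := p
  simp only [pvCells, List.mem_flatMap, List.mem_map, PySem.List.mem_pyRange_one, pvInb,
    decide_eq_true_eq]
  constructor
  · rintro ⟨r, hr, c, hc, heq⟩
    cases heq
    exact ⟨hr.1, hr.2, hc.1, hc.2⟩
  · rintro ⟨h1, h2, h3, h4⟩
    exact ⟨a, ⟨h1, h2⟩, b, ⟨h3, h4⟩, rfl⟩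

lemma pvCells_nodup (rows cols : Int) : (pvCells rows cols).Nodup := by
  have : pvCells rows cols =
      (PySem.List.pyRange 0 rows 1) ×ˢ (PySem.List.pyRange 0 cols 1) := rfl
  rw [this]
  exact List.Nodup.product (PySem.List.nodup_pyRange_one 0 rows)
    (PySem.List.nodup_pyRange_one 0 cols)

-- termination measure: the number of cells strictly higher than h
def pvMu (grid : List (List Int)) (rows cols h : Int) : Nat :=
  ((pvCells rows cols).filter (fun p => decide (h < pvGet grid p.1 p.2))).length

lemma pvFilter_length_lt {α : Type} (l : List α) (p q : α → Bool) :
    (∀ a ∈ l, p a = true → q a = true) → ∀ a, a ∈ l → q a = true → p a = false →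
    (l.filter p).length < (l.filter q).length := by
  induction l with
  | nil => rintro _ a ha; cases ha
  | cons x l ih =>
    intro himp a ha hq hp
    have himp' : ∀ b ∈ l, p b = true → q b = true :=
      fun b hb => himp b (List.mem_cons_of_mem _ hb)
    rcases List.mem_cons.mp ha with rfl | hmem
    · have h1 := List.countP_mono_left himp'
      rw [List.countP_eq_length_filter, List.countP_eq_length_filter] at h1
      simp only [List.filter_cons, hp, hq, if_true, Bool.false_eq_true, if_false,
        List.length_cons]
      omega
    · have hlt := ih himp' a hmem hq hp
      by_cases hx : p x = true
      · have hqx := himp x List.mem_cons_self hx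
        simp only [List.filter_cons, hx, hqx, if_true, List.length_cons]
        omega
      · simp only [Bool.not_eq_true] at hx
        by_cases hqx : q x = true
        · simp only [List.filter_cons, hx, hqx, if_true, Bool.false_eq_true, if_false,
            List.length_cons]
          omega
        · simp only [Bool.not_eq_true] at hqx
          simp only [List.filter_cons, hx, hqx, Bool.false_eq_true, if_false]
          omega

lemma pvMu_lt (grid : List (List Int)) (rows cols : Int) (p : Int × Int)
    (hin : pvInb rows cols p = true) (h : Int) (hp : pvGet grid p.1 p.2 = h + 1) :
    pvMu grid rows cols (h + 1) < pvMu grid rows cols h := by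
  apply pvFilter_length_lt _ _ _
    (fun a _ hlt => by simp only [decide_eq_true_eq] at hlt ⊢; omega)
    p ((pvMem_cells rows cols p).mpr hin)
  · simp [hp]
  · simp [hp]

-- the in-bounds height+1 neighbors of rc
def pvNbr (grid : List (List Int)) (rows cols : Int) (rc : Int × Int) : List (Int × Int) :=
  [(rc.1 - 1, rc.2), (rc.1 + 1, rc.2), (rc.1, rc.2 - 1), (rc.1, rc.2 + 1)].filter
    (fun p => pvInb rows cols p && (pvGet grid p.1 p.2 == pvGet grid rc.1 rc.2 + 1))

-- the common specification: number of distinct upward trails from rc to a 9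
def pvP (grid : List (List Int)) (rows cols : Int) (rc : Int × Int) : Int :=
  if pvGet grid rc.1 rc.2 == 9 then 1
  else
    (pvNbr grid rows cols rc).attach.foldl (fun s p => s + pvP grid rows cols p.1) 0
  termination_by pvMu grid rows cols (pvGet grid rc.1 rc.2)
  decreasing_by
    have hmem := p.2
    simp only [pvNbr, List.mem_filter, Bool.and_eq_true, beq_iff_eq] at hmem
    rw [hmem.2.2]
    exact pvMu_lt grid rows cols p.1 hmem.2.1 _ hmem.2.2

-- ===== shared reduction target: both ports equal pvTotal =====

def pvTotal (grid : List (List Int)) (rows cols : Int) : Int :=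
  (((pvCells rows cols).filter (fun rc => pvGet grid rc.1 rc.2 == 0)).map
    (pvP grid rows cols)).sum

-- ===== A side: memoization is correct =====

def pvGood (grid : List (List Int)) (rows cols : Int)
    (dp : PySem.Dict (Int × Int) Int) : Prop :=
  ∀ k v, PySem.Dict.get? dp k = some v → v = pvP grid rows cols k

lemma pvGood_insert (grid : List (List Int)) (rows cols : Int)
    (dp : PySem.Dict (Int × Int) Int) (k : Int × Int) (v : Int)
    (hg : pvGood grid rows cols dp) (hv : v = pvP grid rows cols k) :
    pvGood grid rows cols (PySem.Dict.insert dp k v) := by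
  intro k' v' h'
  by_cases hk : k' = k
  · subst hk
    rw [PySem.Dict.get?_insert_self] at h'
    cases h'; exact hv
  · rw [PySem.Dict.get?_insert_of_ne _ _ hk] at h'
    exact hg k' v' h'

lemma pvNbr_eq_filter_neighbors (grid : List (List Int)) (rows cols r c : Int) :
    (pvNeighbors r c rows cols).filter
        (fun p => pvGet grid p.1 p.2 == pvGet grid r c + 1) =
      pvNbr grid rows cols (r, c) := by
  simp [pvNeighbors, pvNbr, List.filter_filter, Bool.and_comm]

lemma pvP_of_nine (grid : List (List Int)) (rows cols : Int) (rc : Int × Int)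
    (h : pvGet grid rc.1 rc.2 = 9) : pvP grid rows cols rc = 1 := by
  rw [pvP]; simp [h]

lemma pvP_of_not_nine (grid : List (List Int)) (rows cols : Int) (rc : Int × Int)
    (h : ¬ pvGet grid rc.1 rc.2 = 9) :
    pvP grid rows cols rc = ((pvNbr grid rows cols rc).map (pvP grid rows cols)).sum := by
  rw [pvP]
  simp only [beq_iff_eq, h, if_false]
  rw [List.foldl_attach (f := fun (s : Int) p => s + pvP grid rows cols p),
    PySem.List.foldl_add (g := pvP grid rows cols)]
  simp

lemma pvGetPaths_spec (grid : List (List Int)) (rows cols : Int) :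
    ∀ (fuel : Nat) (dp : PySem.Dict (Int × Int) Int) (r c : Int),
      pvGood grid rows cols dp →
      pvMu grid rows cols (pvGet grid r c) < fuel →
      pvGood grid rows cols (pvGetPaths grid rows cols fuel dp r c).1 ∧
      (∀ k v, PySem.Dict.get? dp k = some v →
        PySem.Dict.get? (pvGetPaths grid rows cols fuel dp r c).1 k = some v) ∧
      PySem.Dict.get? (pvGetPaths grid rows cols fuel dp r c).1 (r, c) =
        some (pvP grid rows cols (r, c)) ∧
      (pvGetPaths grid rows cols fuel dp r c).2 = pvP grid rows cols (r, c) := by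
  intro fuel
  induction fuel with
  | zero => intro dp r c _ hmu; exact absurd hmu (Nat.not_lt_zero _)
  | succ f ih =>
    intro dp r c hg hmu
    rw [pvGetPaths]
    cases hdp : PySem.Dict.get? dp (r, c) with
    | some v =>
      simp only [hdp]
      exact ⟨hg, fun _ _ h => h, by rw [← hg (r, c) v hdp], hg (r, c) v hdp⟩
    | none =>
      by_cases h9 : pvGet grid r c = 9
      · simp only [h9, beq_self_eq_true, if_true]
        have hp1 : (1 : Int) = pvP grid rows cols (r, c) :=
          (pvP_of_nine grid rows cols (r, c) h9).symm
        refine ⟨pvGood_insert _ _ _ _ _ _ hg hp1, ?_, ?_, hp1⟩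
        · intro k v hk
          have hne : k ≠ (r, c) := fun he => by rw [he, hdp] at hk; cases hk
          rw [PySem.Dict.get?_insert_of_ne _ _ hne]; exact hk
        · rw [PySem.Dict.get?_insert_self, ← hp1]
      · have h9' : (pvGet grid r c == 9) = false := by simp [h9]
        simp only [h9', Bool.false_eq_true, if_false]
        -- the neighbor loop
        have goSpec : ∀ (ps : List (Int × Int)),
            (∀ p ∈ ps, pvGet grid p.1 p.2 = pvGet grid r c + 1 →
              pvMu grid rows cols (pvGet grid p.1 p.2) < f) →
            ∀ (dp : PySem.Dict (Int × Int) Int) (acc : Int),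
              pvGood grid rows cols dp →
              pvGood grid rows cols
                (pvGoNbrs grid rows cols f dp ps (pvGet grid r c + 1) acc).1 ∧
              (∀ k v, PySem.Dict.get? dp k = some v →
                PySem.Dict.get?
                  (pvGoNbrs grid rows cols f dp ps (pvGet grid r c + 1) acc).1 k = some v) ∧
              (pvGoNbrs grid rows cols f dp ps (pvGet grid r c + 1) acc).2 =
                acc + ((ps.filter
                    (fun p => pvGet grid p.1 p.2 == pvGet grid r c + 1)).map
                  (pvP grid rows cols)).sum := by
          intro ps
          induction ps with
          | nil => intro _ dp acc hg; rw [pvGoNbrs]; exact ⟨hg, fun _ _ h => h, by simp⟩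
          | cons p ps' ihp =>
            intro hbound dp acc hg
            rw [pvGoNbrs]
            by_cases hph : pvGet grid p.1 p.2 = pvGet grid r c + 1
            · have hphb : (pvGet grid p.1 p.2 == pvGet grid r c + 1) = true := by
                simp [hph]
              simp only [hphb, if_true]
              have hmup := hbound p List.mem_cons_self hph
              obtain ⟨hg1, hmono1, _, hval1⟩ := ih dp p.1 p.2 hg hmup
              obtain ⟨hg2, hmono2, hsum⟩ := ihp
                (fun q hq hgt => hbound q (List.mem_cons_of_mem _ hq) hgt)
                (pvGetPaths grid rows cols f dp p.1 p.2).1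
                (acc + (pvGetPaths grid rows cols f dp p.1 p.2).2) hg1
              refine ⟨hg2, fun k v hk => hmono2 k v (hmono1 k v hk), ?_⟩
              rw [hsum, hval1]
              simp only [List.filter_cons, hphb, if_true, List.map_cons, List.sum_cons]
              ring
            · have hphb : (pvGet grid p.1 p.2 == pvGet grid r c + 1) = false := by
                simp [hph]
              simp only [hphb, Bool.false_eq_true, if_false]
              obtain ⟨hg2, hmono2, hsum⟩ := ihp
                (fun q hq hgt => hbound q (List.mem_cons_of_mem _ hq) hgt) dp acc hg
              refine ⟨hg2, hmono2, ?_⟩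
              rw [hsum]
              simp only [List.filter_cons, hphb, Bool.false_eq_true, if_false]
        have hbound : ∀ p ∈ pvNeighbors r c rows cols,
            pvGet grid p.1 p.2 = pvGet grid r c + 1 →
            pvMu grid rows cols (pvGet grid p.1 p.2) < f := by
          intro p hp hgt
          have hinb : pvInb rows cols p = true := (List.mem_filter.mp hp).2
          have := pvMu_lt grid rows cols p hinb (pvGet grid r c) hgt
          rw [hgt]
          omega
        obtain ⟨hgo, hmono, hsum⟩ :=
          goSpec (pvNeighbors r c rows cols) hbound dp 0 hg
        have hval : (pvGoNbrs grid rows cols f dp (pvNeighbors r c rows cols)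
            (pvGet grid r c + 1) 0).2 = pvP grid rows cols (r, c) := by
          rw [hsum, pvNbr_eq_filter_neighbors, pvP_of_not_nine grid rows cols (r, c) h9]
          simp
        refine ⟨pvGood_insert _ _ _ _ _ _ hgo hval, ?_, ?_, hval⟩
        · intro k v hk
          have hne : k ≠ (r, c) := fun he => by rw [he, hdp] at hk; cases hk
          rw [PySem.Dict.get?_insert_of_ne _ _ hne]
          exact hmono k v hk
        · rw [PySem.Dict.get?_insert_self, hval]

def pvFillStep (grid : List (List Int)) (rows cols : Int) (fuel : Nat)
    (dp : PySem.Dict (Int × Int) Int) (rc : Int × Int) : PySem.Dict (Int × Int) Int :=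
  match PySem.Dict.get? dp (rc.1, rc.2) with
  | some _ => dp
  | none => (pvGetPaths grid rows cols fuel dp rc.1 rc.2).1

lemma pvFill (grid : List (List Int)) (rows cols : Int) (fuel : Nat)
    (hfuel : ∀ r c : Int, pvMu grid rows cols (pvGet grid r c) < fuel) :
    ∀ (l : List (Int × Int)) (dp : PySem.Dict (Int × Int) Int),
      pvGood grid rows cols dp →
      pvGood grid rows cols (l.foldl (pvFillStep grid rows cols fuel) dp) ∧
      (∀ k v, PySem.Dict.get? dp k = some v →
        PySem.Dict.get? (l.foldl (pvFillStep grid rows cols fuel) dp) k = some v) ∧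
      (∀ p ∈ l, PySem.Dict.get? (l.foldl (pvFillStep grid rows cols fuel) dp) p =
        some (pvP grid rows cols p)) := by
  intro l
  induction l with
  | nil => intro dp hg; exact ⟨hg, fun _ _ h => h, by simp⟩
  | cons q l' ih =>
    intro dp hg
    rw [List.foldl_cons]
    have hq : pvGood grid rows cols (pvFillStep grid rows cols fuel dp q) ∧
        (∀ k v, PySem.Dict.get? dp k = some v →
          PySem.Dict.get? (pvFillStep grid rows cols fuel dp q) k = some v) ∧
        PySem.Dict.get? (pvFillStep grid rows cols fuel dp q) (q.1, q.2) =
          some (pvP grid rows cols q) := by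
      unfold pvFillStep
      cases hdp : PySem.Dict.get? dp (q.1, q.2) with
      | some v =>
        have : v = pvP grid rows cols q := by
          have := hg (q.1, q.2) v hdp
          rw [this]
        exact ⟨hg, fun _ _ h => h, by rw [hdp, this]⟩
      | none =>
        obtain ⟨hg1, hmono1, hpres1, _⟩ :=
          pvGetPaths_spec grid rows cols fuel dp q.1 q.2 hg (hfuel q.1 q.2)
        exact ⟨hg1, hmono1, hpres1⟩
    obtain ⟨hg1, hmono1, hpres1⟩ := hq
    obtain ⟨hg2, hmono2, hall2⟩ := ih (pvFillStep grid rows cols fuel dp q) hg1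
    refine ⟨hg2, fun k v hk => hmono2 k v (hmono1 k v hk), ?_⟩
    intro p hp
    rcases List.mem_cons.mp hp with rfl | hmem
    · exact hmono2 (p.1, p.2) _ hpres1
    · exact hall2 p hmem

lemma pvNested_foldl {β : Type} (rows cols : Int) (g : β → Int → Int → β) (init : β) :
    (PySem.List.pyRange 0 rows 1).foldl (fun acc r =>
      (PySem.List.pyRange 0 cols 1).foldl (fun acc c => g acc r c) acc) init
    = (pvCells rows cols).foldl (fun acc rc => g acc rc.1 rc.2) init := by
  rw [pvCells, List.foldl_flatMap]
  simp [List.foldl_map]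

lemma pvCells_length_le (rows cols : Int) :
    (pvCells rows cols).length ≤ (rows * cols).toNat := by
  rw [pvCells, List.length_flatMap]
  simp only [List.length_map, PySem.List.length_pyRange_one]
  rw [List.map_const']
  rw [List.sum_replicate, smul_eq_mul, PySem.List.length_pyRange_one]
  simp only [Int.sub_zero]
  by_cases hr : 0 ≤ rows
  · by_cases hc : 0 ≤ cols
    · obtain ⟨m, rfl⟩ := Int.eq_ofNat_of_zero_le hr
      obtain ⟨n, rfl⟩ := Int.eq_ofNat_of_zero_le hc
      rw [← Int.natCast_mul, Int.toNat_natCast, Int.toNat_natCast, Int.toNat_natCast]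
    · have : cols.toNat = 0 := Int.toNat_of_nonpos (le_of_not_ge hc)
      rw [this]; omega
  · have : rows.toNat = 0 := Int.toNat_of_nonpos (le_of_not_ge hr)
    rw [this]; omega

lemma pvMu_lt_fuel (grid : List (List Int)) (rows cols : Int) (h : Int) :
    pvMu grid rows cols h < (rows * cols).toNat + 1 := by
  have h1 : pvMu grid rows cols h ≤ (pvCells rows cols).length :=
    List.length_filter_le _ _
  have := pvCells_length_le rows cols
  omega

lemma find_trailhead_ratings_eq_total (grid : List (List Int)) :
    find_trailhead_ratings grid =
      pvTotal grid (grid.length : Int)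
        (if 0 < (grid.length : Int) then ((grid.headD []).length : Int) else 0) := by
  simp only [find_trailhead_ratings]
  set R : Int := (grid.length : Int) with hR
  set C : Int := (if 0 < (grid.length : Int) then ((grid.headD []).length : Int) else 0)
    with hC
  set F : Nat := (R * C).toNat + 1 with hF
  rw [pvNested_foldl, pvNested_foldl]
  have hstep : (fun (acc : PySem.Dict (Int × Int) Int) (rc : Int × Int) =>
      match PySem.Dict.get? acc (rc.1, rc.2) with
      | some _ => acc
      | none => (pvGetPaths grid R C F acc rc.1 rc.2).1) = pvFillStep grid R C F := rfl
  rw [hstep]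
  obtain ⟨hgood, -, hall⟩ := pvFill grid R C F
    (fun r c => pvMu_lt_fuel grid R C _) (pvCells R C) PySem.Dict.empty
    (by intro k v h; rw [PySem.Dict.get?_empty] at h; cases h)
  set dpA := (pvCells R C).foldl (pvFillStep grid R C F) PySem.Dict.empty with hdpA
  rw [PySem.List.foldl_if_eq_foldl_filter (p := fun (rc : Int × Int) => pvGet grid rc.1 rc.2 == 0)
    (f := fun (tot : Int) (rc : Int × Int) => tot + PySem.Dict.getD dpA (rc.1, rc.2) 0)]
  rw [PySem.List.foldl_congr_mem
    (l := (pvCells R C).filter (fun rc => pvGet grid rc.1 rc.2 == 0))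
    (f := fun (tot : Int) (rc : Int × Int) => tot + PySem.Dict.getD dpA (rc.1, rc.2) 0)
    (init := 0)
    (g := fun (tot : Int) (rc : Int × Int) => tot + pvP grid R C rc)
    (by
      intro acc x hx
      show acc + PySem.Dict.getD dpA (x.1, x.2) 0 = acc + pvP grid R C x
      have hx' : x ∈ pvCells R C := (List.mem_filter.mp hx).1
      have hsome := hall x hx'
      have : PySem.Dict.get? dpA (x.1, x.2) = some (pvP grid R C x) := by
        rwa [Prod.mk.eta]
      rw [PySem.Dict.getD_of_get?_eq_some _ _ this])]
  rw [PySem.List.foldl_add (g := fun rc => pvP grid R C rc)]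
  rw [pvTotal, zero_add]

-- ===== B side: the descending-height sweep is correct =====

def pvStep (grid : List (List Int)) (rows cols : Int)
    (dp : PySem.Dict (Int × Int) Int) (rc : Int × Int) : PySem.Dict (Int × Int) Int :=
  if pvGet grid rc.1 rc.2 == 9 then PySem.Dict.insert dp rc 1
  else
    PySem.Dict.insert dp rc
      (([(rc.1 - 1, rc.2), (rc.1 + 1, rc.2), (rc.1, rc.2 - 1), (rc.1, rc.2 + 1)].filter
          (fun p => pvInb rows cols p && (pvGet grid p.1 p.2 == pvGet grid rc.1 rc.2 + 1))).foldl
        (fun s p => s + PySem.Dict.getD dp p 0) 0)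

lemma pvStep_value (grid : List (List Int)) (rows cols : Int)
    (dp : PySem.Dict (Int × Int) Int) (q : Int × Int)
    (hnb : ∀ p ∈ pvNbr grid rows cols q,
      PySem.Dict.get? dp p = some (pvP grid rows cols p)) :
    pvStep grid rows cols dp q = PySem.Dict.insert dp q (pvP grid rows cols q) := by
  rw [pvStep]
  by_cases h9 : pvGet grid q.1 q.2 = 9
  · simp only [h9, beq_self_eq_true, if_true]
    rw [pvP_of_nine grid rows cols q h9]
  · have h9' : (pvGet grid q.1 q.2 == 9) = false := by simp [h9]
    simp only [h9', Bool.false_eq_true, if_false]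
    congr 1
    have hl : ([(q.1 - 1, q.2), (q.1 + 1, q.2), (q.1, q.2 - 1), (q.1, q.2 + 1)].filter
        (fun p => pvInb rows cols p && (pvGet grid p.1 p.2 == pvGet grid q.1 q.2 + 1)))
        = pvNbr grid rows cols q := rfl
    rw [hl]
    rw [PySem.List.foldl_congr_mem
      (l := pvNbr grid rows cols q)
      (f := fun (s : Int) (p : Int × Int) => s + PySem.Dict.getD dp p 0)
      (init := (0 : Int))
      (g := fun (s : Int) (p : Int × Int) => s + pvP grid rows cols p)
      (by
        intro acc x hx
        show acc + PySem.Dict.getD dp x 0 = acc + pvP grid rows cols x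
        rw [PySem.Dict.getD_of_get?_eq_some _ _ (hnb x hx)])]
    rw [PySem.List.foldl_add (g := pvP grid rows cols)]
    rw [pvP_of_not_nine grid rows cols q h9, zero_add]

lemma pvSweep (grid : List (List Int)) (rows cols : Int) :
    ∀ (l pre : List (Int × Int)) (dp : PySem.Dict (Int × Int) Int),
      (pre ++ l).Pairwise (fun a b => -pvGet grid a.1 a.2 ≤ -pvGet grid b.1 b.2) →
      (pre ++ l).Nodup →
      (∀ p : Int × Int, pvInb rows cols p = true → p ∈ pre ++ l) →
      (∀ p ∈ pre, PySem.Dict.get? dp p = some (pvP grid rows cols p)) →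
      ∀ p ∈ pre ++ l,
        PySem.Dict.get? (l.foldl (pvStep grid rows cols) dp) p =
          some (pvP grid rows cols p) := by
  intro l
  induction l with
  | nil =>
    intro pre dp _ _ _ hpre p hp
    rw [List.foldl_nil]
    exact hpre p (by simpa using hp)
  | cons q l' ih =>
    intro pre dp hpw hnd hinb hpre
    have hnbmem : ∀ n ∈ pvNbr grid rows cols q, n ∈ pre := by
      intro n hn
      rw [pvNbr, List.mem_filter] at hn
      obtain ⟨-, hcond⟩ := hn
      rw [Bool.and_eq_true, beq_iff_eq] at hcond
      obtain ⟨hinbn, hh⟩ := hcond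
      rcases List.mem_append.mp (hinb n hinbn) with h | h
      · exact h
      · rcases List.mem_cons.mp h with rfl | h'
        · exfalso; omega
        · exfalso
          have hpw' := (List.pairwise_append.mp hpw).2.1
          have hrel := (List.pairwise_cons.mp hpw').1 n h'
          omega
    have hstep : pvStep grid rows cols dp q =
        PySem.Dict.insert dp q (pvP grid rows cols q) :=
      pvStep_value grid rows cols dp q (fun n hn => hpre n (hnbmem n hn))
    have hqpre : q ∉ pre := by
      intro hq
      exact (List.nodup_append.mp hnd).2.2 q hq q List.mem_cons_self rfl
    have hpre' : ∀ p' ∈ pre ++ [q],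
        PySem.Dict.get? (PySem.Dict.insert dp q (pvP grid rows cols q)) p' =
          some (pvP grid rows cols p') := by
      intro p' hp'
      rcases List.mem_append.mp hp' with h | h
      · have hne : p' ≠ q := fun he => hqpre (he ▸ h)
        rw [PySem.Dict.get?_insert_of_ne _ _ hne]
        exact hpre p' h
      · have : p' = q := List.mem_singleton.mp h
        subst this
        rw [PySem.Dict.get?_insert_self]
    have hassoc : pre ++ q :: l' = (pre ++ [q]) ++ l' := by simp
    rw [hassoc] at hpw hnd hinb
    intro p hp
    rw [hassoc] at hp
    rw [List.foldl_cons, hstep]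
    exact ih (pre ++ [q]) _ hpw hnd hinb hpre' p hp

lemma find_trailhead_ratings_alt_eq_total (grid : List (List Int)) :
    find_trailhead_ratings_alt grid =
      pvTotal grid (grid.length : Int)
        (if 0 < (grid.length : Int) then ((grid.headD []).length : Int) else 0) := by
  simp only [find_trailhead_ratings_alt]
  set R : Int := (grid.length : Int) with hR
  set C : Int := (if 0 < (grid.length : Int) then ((grid.headD []).length : Int) else 0)
    with hC
  have hcell : ((PySem.List.pyRange 0 R 1).flatMap (fun r =>
      (PySem.List.pyRange 0 C 1).map (fun c => (r, c)))) = pvCells R C := rfl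
  rw [hcell]
  have hstep : (fun (dp : PySem.Dict (Int × Int) Int) (rc : Int × Int) =>
      if pvGet grid rc.1 rc.2 == 9 then PySem.Dict.insert dp rc 1
      else
        PySem.Dict.insert dp rc
          (([(rc.1 - 1, rc.2), (rc.1 + 1, rc.2), (rc.1, rc.2 - 1), (rc.1, rc.2 + 1)].filter
              (fun p => pvInb R C p && (pvGet grid p.1 p.2 == pvGet grid rc.1 rc.2 + 1))).foldl
            (fun s p => s + PySem.Dict.getD dp p 0) 0)) = pvStep grid R C := rfl
  rw [hstep]
  have hpw : (PySem.List.sorted (pvCells R C)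
        (fun rc => -pvGet grid rc.1 rc.2) false).Pairwise
      (fun a b => -pvGet grid a.1 a.2 ≤ -pvGet grid b.1 b.2) := by
    simpa using PySem.List.sorted_pairwise (xs := pvCells R C)
      (key := fun rc => -pvGet grid rc.1 rc.2)
  have hnd : (PySem.List.sorted (pvCells R C)
        (fun rc => -pvGet grid rc.1 rc.2) false).Nodup :=
    (List.Perm.nodup_iff (PySem.List.sorted_perm _ _ _)).mpr (pvCells_nodup R C)
  have hall := pvSweep grid R C
    (PySem.List.sorted (pvCells R C) (fun rc => -pvGet grid rc.1 rc.2) false)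
    [] PySem.Dict.empty (by simpa using hpw) (by simpa using hnd)
    (by
      intro p hp
      simpa [PySem.List.mem_sorted] using (pvMem_cells R C p).mpr hp)
    (by intro p hp; cases hp)
  set dpB := (PySem.List.sorted (pvCells R C)
    (fun rc => -pvGet grid rc.1 rc.2) false).foldl (pvStep grid R C) PySem.Dict.empty
    with hdpB
  rw [PySem.List.foldl_congr_mem
    (l := (pvCells R C).filter (fun rc => pvGet grid rc.1 rc.2 == 0))
    (f := fun (s : Int) (rc : Int × Int) => s + PySem.Dict.getD dpB rc 0)
    (init := 0)
    (g := fun (s : Int) (rc : Int × Int) => s + pvP grid R C rc)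
    (by
      intro acc x hx
      show acc + PySem.Dict.getD dpB x 0 = acc + pvP grid R C x
      have hx' : x ∈ pvCells R C := (List.mem_filter.mp hx).1
      have hxo : x ∈ ([] : List (Int × Int)) ++
          PySem.List.sorted (pvCells R C) (fun rc => -pvGet grid rc.1 rc.2) false := by
        simpa [PySem.List.mem_sorted] using hx'
      rw [PySem.Dict.getD_of_get?_eq_some _ _ (hall x hxo)])]
  rw [PySem.List.foldl_add (g := fun rc => pvP grid R C rc), pvTotal, zero_add]

-- ===== VERDICT (by name: the statement is the Claim_ definition above) =====
theorem find_trailhead_ratings_spec : Claim_equal_find_trailhead_ratings := by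
  intro grid _ _
  unfold Spec_find_trailhead_ratings
  rw [find_trailhead_ratings_eq_total, find_trailhead_ratings_alt_eq_total]
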